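-- pv_equiv track=rewrite | github.com/PaddleStroke/Bilingual-ebook-maker | bilingualEbook V5.py | jListeTexteTOjData
-- ===== SOURCE A (Python) =====
-- def jListeTexteTOjData(j, DataB):
-- 	jData=0
-- 	while jData<len(DataB):
-- 		if DataB[jData][0] == j:
-- 			return jData
-- 		jData+=1
--
-- 	jData=0 #si j n'est pas dans Data (une balise <cite> par exemple) alors on donne un résultat inexacte
-- 	while jData<len(DataB):
-- 		if DataB[jData][0] in [j-1,j+1]:
-- 			return jData
-- 		jData+=1
--
-- 	return 50000
-- ===== SOURCE B (Python) =====
-- def jListeTexteTOjData(j, DataB):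
--     fallback = None
--     for idx, entry in enumerate(DataB):
--         h = entry[0]
--         if h == j:
--             return idx
--         if fallback is None and h in (j - 1, j + 1):
--             fallback = idx
--     return fallback if fallback is not None else 50000
-- ===== Notes on version B (the rewrite author's own statement) =====
-- stated objective: simpler
-- what changed: Replaces A's two sequential index-while scans (exact match pass, then j±1 pass) with a single enumerate pass that returns immediately on an exact match and records the first j±1 index as a fallback returned after the loop.
import Mathlib
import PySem

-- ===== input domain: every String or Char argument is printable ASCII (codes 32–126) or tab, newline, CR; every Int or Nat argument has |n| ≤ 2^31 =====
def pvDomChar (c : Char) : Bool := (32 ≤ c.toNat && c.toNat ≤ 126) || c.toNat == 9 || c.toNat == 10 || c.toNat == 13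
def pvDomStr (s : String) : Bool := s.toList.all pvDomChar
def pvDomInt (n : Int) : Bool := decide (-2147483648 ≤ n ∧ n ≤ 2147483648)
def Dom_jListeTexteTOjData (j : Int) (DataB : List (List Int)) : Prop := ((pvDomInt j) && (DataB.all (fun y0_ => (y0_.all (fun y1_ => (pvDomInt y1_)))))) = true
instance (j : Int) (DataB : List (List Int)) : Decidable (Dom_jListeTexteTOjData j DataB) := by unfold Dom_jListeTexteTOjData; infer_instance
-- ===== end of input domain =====

-- B replaces A's two sequential while-scans by a single pass with a recorded fallback index (simpler, one traversal).
-- Inside Pre_ every row that the scans reach is nonempty, so row.headD 0 is exactly Python's row[0].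

-- ===== PORT A =====
-- first while loop: scan for DataB[jData][0] == j
def pvLoopA1 (j : Int) : List (List Int) → Int → Option Int
  | [], _ => none
  | r :: t, idx => if r.headD 0 = j then some idx else pvLoopA1 j t (idx + 1)

-- second while loop: scan for DataB[jData][0] in [j-1, j+1]
def pvLoopA2 (j : Int) : List (List Int) → Int → Option Int
  | [], _ => none
  | r :: t, idx => if r.headD 0 = j - 1 ∨ r.headD 0 = j + 1 then some idx else pvLoopA2 j t (idx + 1)

def jListeTexteTOjData (j : Int) (DataB : List (List Int)) : Int :=
  match pvLoopA1 j DataB 0 with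
  | some i => i
  | none =>
    match pvLoopA2 j DataB 0 with
    | some i => i
    | none => 50000

-- ===== PORT B =====
-- single pass: return on exact match, remember the first j±1 index as fallback
def pvLoopB (j : Int) : List (List Int) → Int → Option Int → Int
  | [], _, fb => fb.getD 50000
  | r :: t, idx, fb =>
    if r.headD 0 = j then idx
    else
      pvLoopB j t (idx + 1)
        (match fb with
         | some f => some f
         | none => if r.headD 0 = j - 1 ∨ r.headD 0 = j + 1 then some idx else none)

def jListeTexteTOjData_alt (j : Int) (DataB : List (List Int)) : Int :=
  pvLoopB j DataB 0 none

-- ===== PRECONDITION & SPEC =====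
-- Pre_ excludes exactly the inputs where Python A raises IndexError: an empty row reached
-- before any exact-match row (row[0] == j); B raises there too.
def Pre_jListeTexteTOjData (j : Int) (DataB : List (List Int)) : Prop :=
  ∀ p ∈ DataB.zipIdx, p.1 = [] → ∃ q ∈ DataB.zipIdx, q.2 < p.2 ∧ q.1.head? = some j
instance (j : Int) (DataB : List (List Int)) : Decidable (Pre_jListeTexteTOjData j DataB) := by
  unfold Pre_jListeTexteTOjData; infer_instance

def pvWitness_jListeTexteTOjData : Int × List (List Int) := (1, [[2, 5], [1], [0]])

def Spec_jListeTexteTOjData (j : Int) (DataB : List (List Int)) (out : Int) : Prop := out = jListeTexteTOjData_alt j DataB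
instance (j : Int) (DataB : List (List Int)) (out : Int) : Decidable (Spec_jListeTexteTOjData j DataB out) := by unfold Spec_jListeTexteTOjData; infer_instance

-- ===== CLAIM (what is proved, stated in full; the proofs are below) =====
def Claim_equal_jListeTexteTOjData : Prop := ∀ (j : Int) (DataB : List (List Int)), Dom_jListeTexteTOjData j DataB → Pre_jListeTexteTOjData j DataB → Spec_jListeTexteTOjData j DataB (jListeTexteTOjData j DataB)

-- ===== LEMMAS AND PROOFS =====

-- invariant: the one-pass loop equals "exact-match scan, else fallback, else j±1 scan"
theorem pvLoopB_eq (j : Int) (l : List (List Int)) :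
    ∀ (idx : Int) (fb : Option Int),
      pvLoopB j l idx fb =
        match pvLoopA1 j l idx with
        | some i => i
        | none =>
          match fb with
          | some f => f
          | none => (pvLoopA2 j l idx).getD 50000 := by
  induction l with
  | nil => intro idx fb; cases fb <;> simp [pvLoopB, pvLoopA1, pvLoopA2]
  | cons r t ih =>
    intro idx fb
    simp only [pvLoopB, pvLoopA1, pvLoopA2]
    by_cases h1 : r.head?.getD 0 = j
    · simp [h1]
    · by_cases h2 : r.head?.getD 0 = j - 1 ∨ r.head?.getD 0 = j + 1
      · cases fb <;> simp [h1, h2, ih]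
      · cases fb <;> simp [h1, h2, ih]

-- ===== VERDICT (by name: the statement is the Claim_ definition above) =====
theorem jListeTexteTOjData_spec : Claim_equal_jListeTexteTOjData := by
  intro j DataB _ _
  unfold Spec_jListeTexteTOjData jListeTexteTOjData jListeTexteTOjData_alt
  rw [pvLoopB_eq]
  cases pvLoopA1 j DataB 0 <;> cases pvLoopA2 j DataB 0 <;> simp
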